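-- pv_equiv track=rewrite | github.com/BTCElectrician/ohmni-oracle-v3 | services/extraction/architectural.py | _prioritize_architectural_tables
-- ===== SOURCE A (Python) =====
-- from typing import List, Dict, Any, Optional
--
-- def _prioritize_architectural_tables(
--     tables: List[Dict[str, Any]]
-- ) -> List[Dict[str, Any]]:
--     """Prioritize architectural tables by type."""
--     # Prioritize tables likely to be room schedules
--     room_tables = []
--     other_tables = []
--
--     for table in tables:
--         content = table.get("content", "").lower()
--         if "room" in content or "space" in content or "finish" in content:
--             room_tables.append(table)
--         else:
--             other_tables.append(table)
--
--     return room_tables + other_tables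
-- ===== SOURCE B (Python) =====
-- def _prioritize_architectural_tables(tables):
--     """Prioritize architectural tables by type."""
--     # Stable single-pass sort on a binary key: room-like tables first,
--     # within-group order preserved by sort stability.
--     return sorted(
--         tables,
--         key=lambda t: 0 if any(
--             w in t.get("content", "").lower() for w in ("room", "space", "finish")
--         ) else 1,
--     )
-- ===== Notes on version B (the rewrite author's own statement) =====
-- stated objective: idiomatic
-- what changed: The explicit two-accumulator partition loop with list concatenation is replaced by a single stable sort on a binary key (0 for room/space/finish tables, 1 otherwise), relying on sort stability to preserve within-group order.
import Mathlib
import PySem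

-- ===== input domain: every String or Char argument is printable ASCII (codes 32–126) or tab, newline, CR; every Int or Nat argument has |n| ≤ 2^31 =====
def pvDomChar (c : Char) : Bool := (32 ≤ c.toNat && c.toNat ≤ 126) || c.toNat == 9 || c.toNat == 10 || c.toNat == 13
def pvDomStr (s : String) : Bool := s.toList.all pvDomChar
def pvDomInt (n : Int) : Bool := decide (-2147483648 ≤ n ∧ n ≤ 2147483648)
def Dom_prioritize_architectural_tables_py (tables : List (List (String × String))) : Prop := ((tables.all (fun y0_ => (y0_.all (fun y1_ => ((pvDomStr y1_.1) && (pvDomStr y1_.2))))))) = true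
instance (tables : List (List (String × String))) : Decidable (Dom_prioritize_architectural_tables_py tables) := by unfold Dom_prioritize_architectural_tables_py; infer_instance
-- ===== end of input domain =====

-- B replaces A's two-accumulator partition loop with one stable sort on a binary key (idiomatic, same result).

-- ===== PORT A =====
-- two-list partition loop, then concatenation; dict.get("content","") = first match in the association list
def prioritize_architectural_tables_py (tables : List (List (String × String))) : List (List (String × String)) :=
  let p := tables.foldl (fun (acc : List (List (String × String)) × List (List (String × String))) table =>
    let content := PySem.Str.lower (((table.find? (fun kv => kv.1 == "content")).map Prod.snd).getD "")
    if PySem.Str.isIn "room" content || PySem.Str.isIn "space" content || PySem.Str.isIn "finish" content then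
      (acc.1 ++ [table], acc.2)
    else
      (acc.1, acc.2 ++ [table])) ([], [])
  p.1 ++ p.2

-- ===== PORT B =====
-- the sort key: 0 if any of the three words occurs in the lowered content, else 1
def pvKeyB (t : List (String × String)) : Int :=
  if ["room", "space", "finish"].any (fun w =>
      PySem.Str.isIn w (PySem.Str.lower (((t.find? (fun kv => kv.1 == "content")).map Prod.snd).getD "")))
  then 0 else 1

def prioritize_architectural_tables_py_alt (tables : List (List (String × String))) : List (List (String × String)) :=
  PySem.List.sorted tables pvKeyB false

-- ===== PRECONDITION & SPEC =====
def Spec_prioritize_architectural_tables_py (tables : List (List (String × String))) (out : List (List (String × String))) : Prop := out = prioritize_architectural_tables_py_alt tables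
instance (tables : List (List (String × String))) (out : List (List (String × String))) : Decidable (Spec_prioritize_architectural_tables_py tables out) := by unfold Spec_prioritize_architectural_tables_py; infer_instance

-- ===== CLAIM (what is proved, stated in full; the proofs are below) =====
def Claim_equal_prioritize_architectural_tables_py : Prop := ∀ (tables : List (List (String × String))), Dom_prioritize_architectural_tables_py tables → Spec_prioritize_architectural_tables_py tables (prioritize_architectural_tables_py tables)

-- ===== LEMMAS AND PROOFS =====

-- A's branch test, as a predicate
def pvCond (t : List (String × String)) : Bool :=
  let content := PySem.Str.lower (((t.find? (fun kv => kv.1 == "content")).map Prod.snd).getD "")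
  PySem.Str.isIn "room" content || PySem.Str.isIn "space" content || PySem.Str.isIn "finish" content

theorem pvKeyB_eq (t : List (String × String)) : pvKeyB t = if pvCond t then 0 else 1 := by
  simp [pvKeyB, pvCond, List.any, Bool.or_assoc]

-- the comparator used by the insertion sort, evaluated through pvCond
theorem pvLt_eval (x y : List (String × String)) :
    (decide (pvKeyB x < pvKeyB y)) = (pvCond x && !pvCond y) := by
  rw [pvKeyB_eq, pvKeyB_eq]
  cases hx : pvCond x <;> cases hy : pvCond y <;> simp

-- A's partition loop computes the two filters
theorem pvFoldA (xs : List (List (String × String)))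
    (r o : List (List (String × String))) :
    xs.foldl (fun (acc : List (List (String × String)) × List (List (String × String))) table =>
      let content := PySem.Str.lower (((table.find? (fun kv => kv.1 == "content")).map Prod.snd).getD "")
      if PySem.Str.isIn "room" content || PySem.Str.isIn "space" content || PySem.Str.isIn "finish" content then
        (acc.1 ++ [table], acc.2)
      else
        (acc.1, acc.2 ++ [table])) (r, o)
    = (r ++ xs.filter pvCond, o ++ xs.filter (fun t => !pvCond t)) := by
  induction xs generalizing r o with
  | nil => simp
  | cons x xs ih =>
    by_cases h : pvCond x = true
    · have h' := h
      unfold pvCond at h'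
      simp only [List.foldl_cons, List.filter_cons, h, h']
      rw [ih]
      simp
    · have h' : ¬ (let content := PySem.Str.lower (((x.find? (fun kv => kv.1 == "content")).map Prod.snd).getD "")
        (PySem.Str.isIn "room" content || PySem.Str.isIn "space" content || PySem.Str.isIn "finish" content) = true) := by
        unfold pvCond at h; exact h
      simp only [List.foldl_cons, List.filter_cons, if_neg h', h]
      rw [ih]
      simp [h]

-- the two insertBy lemmas and the fold invariant, over the simplified comparator
theorem pvInsertBy_true (x : List (String × String))
    (r o : List (List (String × String)))
    (hx : pvCond x = true)
    (hr : ∀ a ∈ r, pvCond a = true) (ho : ∀ a ∈ o, pvCond a = false) :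
    PySem.List.insertBy (fun a b => pvCond a && !pvCond b) x (r ++ o) = r ++ x :: o := by
  induction r with
  | nil =>
    cases o with
    | nil => rfl
    | cons y t =>
      have hy := ho y (by simp)
      simp [PySem.List.insertBy, hx, hy]
  | cons a r ih =>
    have ha := hr a (by simp)
    have ih' := ih (fun b hb => hr b (by simp [hb]))
    simp only [List.cons_append, PySem.List.insertBy, ha, Bool.not_true, Bool.and_false,
      Bool.false_eq_true, if_false, ih']

theorem pvInsertBy_false (x : List (String × String))
    (l : List (List (String × String)))
    (hx : pvCond x = false) :
    PySem.List.insertBy (fun a b => pvCond a && !pvCond b) x l = l ++ [x] := by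
  induction l with
  | nil => rfl
  | cons a l ih => simp [PySem.List.insertBy, hx, ih]

theorem pvFoldB (xs : List (List (String × String)))
    (r o : List (List (String × String)))
    (hr : ∀ a ∈ r, pvCond a = true) (ho : ∀ a ∈ o, pvCond a = false) :
    xs.foldl (fun acc x => PySem.List.insertBy (fun a b => pvCond a && !pvCond b) x acc) (r ++ o)
    = (r ++ xs.filter pvCond) ++ (o ++ xs.filter (fun t => !pvCond t)) := by
  induction xs generalizing r o with
  | nil => simp
  | cons x xs ih =>
    by_cases h : pvCond x = true
    · rw [List.foldl_cons, pvInsertBy_true x r o h hr ho,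
        show r ++ x :: o = (r ++ [x]) ++ o by simp]
      have hr' : ∀ a ∈ r ++ [x], pvCond a = true := by
        intro a ha
        rcases List.mem_append.mp ha with h' | h'
        · exact hr a h'
        · simp at h'; simpa [h'] using h
      rw [ih (r ++ [x]) o hr' ho]
      simp [List.filter_cons, h]
    · have h' : pvCond x = false := by simpa using h
      rw [List.foldl_cons, pvInsertBy_false x (r ++ o) h',
        show (r ++ o) ++ [x] = r ++ (o ++ [x]) by simp]
      have ho' : ∀ a ∈ o ++ [x], pvCond a = false := by
        intro a ha
        rcases List.mem_append.mp ha with hh | hh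
        · exact ho a hh
        · simp at hh; simpa [hh] using h'
      rw [ih r (o ++ [x]) hr ho']
      simp [List.filter_cons, h']

-- ===== VERDICT (by name: the statement is the Claim_ definition above) =====
theorem prioritize_architectural_tables_py_spec : Claim_equal_prioritize_architectural_tables_py := by
  intro tables _
  show prioritize_architectural_tables_py tables = prioritize_architectural_tables_py_alt tables
  rw [prioritize_architectural_tables_py, prioritize_architectural_tables_py_alt,
    PySem.List.sorted_eq_foldl_insertBy]
  have hfun : (fun (a b : List (String × String)) => decide (pvKeyB a < pvKeyB b))
      = (fun a b => pvCond a && !pvCond b) := funext fun a => funext fun b => pvLt_eval a b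
  rw [hfun, pvFoldA tables [] []]
  have := pvFoldB tables [] [] (by simp) (by simp)
  simp only [List.nil_append] at this ⊢
  rw [this]
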